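-- pv_equiv track=rewrite | github.com/SWORDIntel/MunchMusings | bootstrap.py | current_source_family_balance
-- ===== SOURCE A (Python) =====
-- def current_source_family_balance(accounting_rows: list[dict[str, str]]) -> tuple[bool, str]:
--     current_families = {
--         row.get('source_family', '')
--         for row in accounting_rows
--         if row.get('recency_status') == 'current'
--     }
--     baseline_families = {'humanitarian', 'humanitarian_feed', 'macro_price', 'trade', 'market_monitor', 'geospatial_reference'}
--     proxy_families = {'place', 'market', 'market_monitor', 'retail_catalogue'}
--     has_baseline = bool(current_families & baseline_families)
--     has_proxy = bool(current_families & proxy_families)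
--     if has_baseline and has_proxy:
--         return True, 'Current source-family balance meets the baseline-plus-proxy minimum.'
--     return False, 'Decision gating still lacks one current baseline family and one current proxy family.'
-- ===== SOURCE B (Python) =====
-- BASELINE_FAMILIES = {'humanitarian', 'humanitarian_feed', 'macro_price', 'trade', 'market_monitor', 'geospatial_reference'}
-- PROXY_FAMILIES = {'place', 'market', 'market_monitor', 'retail_catalogue'}
--
--
-- def current_source_family_balance(accounting_rows: list[dict[str, str]]) -> tuple[bool, str]:
--     has_baseline = False
--     has_proxy = False
--     for row in accounting_rows:
--         if row.get('recency_status') == 'current':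
--             fam = row.get('source_family', '')
--             if fam in BASELINE_FAMILIES:
--                 has_baseline = True
--             if fam in PROXY_FAMILIES:
--                 has_proxy = True
--             if has_baseline and has_proxy:
--                 break
--     if has_baseline and has_proxy:
--         return True, 'Current source-family balance meets the baseline-plus-proxy minimum.'
--     return False, 'Decision gating still lacks one current baseline family and one current proxy family.'
-- ===== Notes on version B (the rewrite author's own statement) =====
-- stated objective: simpler
-- what changed: Replaces the set comprehension over all rows plus two set intersections with a single early-exiting pass that maintains two boolean flags, testing each current row's family against the baseline and proxy sets independently and stopping once both flags are set.
import Mathlib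
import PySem

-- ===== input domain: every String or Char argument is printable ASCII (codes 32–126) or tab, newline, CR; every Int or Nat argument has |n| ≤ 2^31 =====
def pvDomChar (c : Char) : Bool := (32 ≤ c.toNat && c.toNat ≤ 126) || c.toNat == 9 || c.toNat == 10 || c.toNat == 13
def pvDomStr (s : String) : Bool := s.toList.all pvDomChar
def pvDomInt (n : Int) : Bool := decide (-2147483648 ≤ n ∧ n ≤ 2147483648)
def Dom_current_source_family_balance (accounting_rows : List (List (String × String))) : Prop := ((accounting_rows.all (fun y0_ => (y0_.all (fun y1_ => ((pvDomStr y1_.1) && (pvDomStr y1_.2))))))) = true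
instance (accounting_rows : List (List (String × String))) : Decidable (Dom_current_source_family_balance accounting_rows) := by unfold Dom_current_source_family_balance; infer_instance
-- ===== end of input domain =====

-- ===== PORT A =====
-- B replaces the full set comprehension + two set intersections by one early-exiting
-- pass keeping two boolean flags (objective: simpler).
def pvBaselineA : PySem.Set String :=
  PySem.Set.ofList ["humanitarian", "humanitarian_feed", "macro_price", "trade", "market_monitor", "geospatial_reference"]

def pvProxyA : PySem.Set String :=
  PySem.Set.ofList ["place", "market", "market_monitor", "retail_catalogue"]

def current_source_family_balance (accounting_rows : List (List (String × String))) : Bool × String :=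
  let current_families : PySem.Set String :=
    accounting_rows.foldl
      (fun s row =>
        if (PySem.Dict.mk row).get? "recency_status" == some "current" then
          PySem.Set.add s ((PySem.Dict.mk row).getD "source_family" "")
        else s)
      PySem.Set.empty
  let has_baseline : Bool := PySem.Set.len (PySem.Set.inter current_families pvBaselineA) != 0
  let has_proxy : Bool := PySem.Set.len (PySem.Set.inter current_families pvProxyA) != 0
  if has_baseline && has_proxy then
    (true, "Current source-family balance meets the baseline-plus-proxy minimum.")
  else
    (false, "Decision gating still lacks one current baseline family and one current proxy family.")

-- ===== PORT B =====
def pvBaselineB : PySem.Set String :=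
  PySem.Set.ofList ["humanitarian", "humanitarian_feed", "macro_price", "trade", "market_monitor", "geospatial_reference"]

def pvProxyB : PySem.Set String :=
  PySem.Set.ofList ["place", "market", "market_monitor", "retail_catalogue"]

-- the for-loop of Source B: two flags, break as soon as both are set
def pvAltLoop : List (List (String × String)) → Bool → Bool → Bool × Bool
  | [], has_baseline, has_proxy => (has_baseline, has_proxy)
  | row :: rest, has_baseline, has_proxy =>
    if (PySem.Dict.mk row).get? "recency_status" == some "current" then
      let fam := (PySem.Dict.mk row).getD "source_family" ""
      let hb := has_baseline || PySem.Set.contains pvBaselineB fam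
      let hp := has_proxy || PySem.Set.contains pvProxyB fam
      if hb && hp then (hb, hp) else pvAltLoop rest hb hp
    else pvAltLoop rest has_baseline has_proxy

def current_source_family_balance_alt (accounting_rows : List (List (String × String))) : Bool × String :=
  let flags := pvAltLoop accounting_rows false false
  if flags.1 && flags.2 then
    (true, "Current source-family balance meets the baseline-plus-proxy minimum.")
  else
    (false, "Decision gating still lacks one current baseline family and one current proxy family.")

-- ===== PRECONDITION & SPEC =====
def Spec_current_source_family_balance (accounting_rows : List (List (String × String))) (out : Bool × String) : Prop := out = current_source_family_balance_alt accounting_rows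
instance (accounting_rows : List (List (String × String))) (out : Bool × String) : Decidable (Spec_current_source_family_balance accounting_rows out) := by unfold Spec_current_source_family_balance; infer_instance

-- ===== CLAIM (what is proved, stated in full; the proofs are below) =====
def Claim_equal_current_source_family_balance : Prop := ∀ (accounting_rows : List (List (String × String))), Dom_current_source_family_balance accounting_rows → Spec_current_source_family_balance accounting_rows (current_source_family_balance accounting_rows)

-- ===== LEMMAS AND PROOFS =====

-- row predicates shared by the proofs (not by the ports)
def pvCur (row : List (String × String)) : Bool :=
  (PySem.Dict.mk row).get? "recency_status" == some "current"

def pvFam (row : List (String × String)) : String :=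
  (PySem.Dict.mk row).getD "source_family" ""

-- membership in A's accumulated set of current families
theorem pv_mem_foldl (rows : List (List (String × String))) (s : PySem.Set String) (x : String) :
    x ∈ rows.foldl
      (fun s row =>
        if (PySem.Dict.mk row).get? "recency_status" == some "current" then
          PySem.Set.add s ((PySem.Dict.mk row).getD "source_family" "")
        else s) s
    ↔ x ∈ s ∨ ∃ row ∈ rows, pvCur row = true ∧ pvFam row = x := by
  induction rows generalizing s with
  | nil => simp
  | cons row rest ih =>
    simp only [List.foldl_cons]
    by_cases h : ((PySem.Dict.mk row).get? "recency_status" == some "current") = true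
    · rw [if_pos h, ih]
      have hc : pvCur row = true := h
      simp only [PySem.Set.mem_add, List.mem_cons]
      constructor
      · rintro (⟨hs | he⟩ | ⟨r, hr, h1, h2⟩)
        · exact Or.inl hs
        · exact Or.inr ⟨row, Or.inl rfl, hc, he.symm⟩
        · exact Or.inr ⟨r, Or.inr hr, h1, h2⟩
      · rintro (hs | ⟨r, (rfl | hr), h1, h2⟩)
        · exact Or.inl (Or.inl hs)
        · exact Or.inl (Or.inr h2.symm)
        · exact Or.inr ⟨r, hr, h1, h2⟩
    · rw [if_neg h, ih]
      have hc : pvCur row = false := Bool.eq_false_iff.mpr h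
      constructor
      · rintro (hs | ⟨r, hr, h1, h2⟩)
        · exact Or.inl hs
        · exact Or.inr ⟨r, List.mem_cons_of_mem _ hr, h1, h2⟩
      · rintro (hs | ⟨r, hr, h1, h2⟩)
        · exact Or.inl hs
        · rcases List.mem_cons.mp hr with rfl | hr'
          · rw [hc] at h1; cases h1
          · exact Or.inr ⟨r, hr', h1, h2⟩

-- a set's intersection is nonempty (its len is nonzero) iff some element lies in both
theorem pv_inter_len (s t : PySem.Set String) :
    (PySem.Set.len (PySem.Set.inter s t) != 0) = (decide (∃ x, x ∈ s ∧ x ∈ t)) := by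
  have hm : ∀ x : String, x ∈ PySem.Set.inter s t ↔ x ∈ s ∧ x ∈ t :=
    fun x => PySem.Set.mem_inter s t x
  cases hi : PySem.Set.inter s t with
  | nil =>
      simp only [hi] at hm
      simp only [PySem.Set.len, List.length_nil, Nat.cast_zero, bne_self_eq_false]
      symm
      simp only [decide_eq_false_iff_not]
      rintro ⟨x, hx⟩
      exact (List.not_mem_nil).elim ((hm x).2 hx)
  | cons y ys =>
      simp only [hi] at hm
      simp only [PySem.Set.len, List.length_cons]
      have he : (∃ x, x ∈ s ∧ x ∈ t) := ⟨y, (hm y).1 (List.mem_cons_self ..)⟩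
      simp only [he, decide_true, bne_iff_ne, ne_eq]
      omega

-- Source B's loop computes the two 'any' flags (the break fires only when both are already true)
theorem pv_altLoop (rows : List (List (String × String))) (hb hp : Bool) :
    pvAltLoop rows hb hp =
      (hb || rows.any (fun row => pvCur row && PySem.Set.contains pvBaselineB (pvFam row)),
       hp || rows.any (fun row => pvCur row && PySem.Set.contains pvProxyB (pvFam row))) := by
  induction rows generalizing hb hp with
  | nil => simp [pvAltLoop]
  | cons row rest ih =>
    simp only [pvAltLoop, List.any_cons]
    by_cases h : ((PySem.Dict.mk row).get? "recency_status" == some "current") = true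
    · rw [if_pos h]
      have hc : pvCur row = true := h
      rw [show (PySem.Dict.mk row).getD "source_family" "" = pvFam row from rfl]
      rw [hc, Bool.true_and, Bool.true_and]
      by_cases hbr : ((hb || PySem.Set.contains pvBaselineB (pvFam row)) &&
          (hp || PySem.Set.contains pvProxyB (pvFam row))) = true
      · rw [if_pos hbr]
        obtain ⟨h1, h2⟩ := Bool.and_eq_true_iff.mp hbr
        rw [← Bool.or_assoc, ← Bool.or_assoc, h1, h2, Bool.true_or, Bool.true_or]
      · rw [if_neg hbr, ih]
        rw [Bool.or_assoc, Bool.or_assoc]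
    · rw [if_neg h, ih]
      have hc : pvCur row = false := Bool.eq_false_iff.mpr h
      rw [hc, Bool.false_and, Bool.false_and, Bool.false_or, Bool.false_or]

-- each intersection-nonempty flag of A equals the corresponding any-flag of B
theorem pv_flag_eq (rows : List (List (String × String))) (t : PySem.Set String) :
    (PySem.Set.len (PySem.Set.inter
      (rows.foldl
        (fun s row =>
          if (PySem.Dict.mk row).get? "recency_status" == some "current" then
            PySem.Set.add s ((PySem.Dict.mk row).getD "source_family" "")
          else s) PySem.Set.empty) t) != 0)
    = rows.any (fun row => pvCur row && PySem.Set.contains t (pvFam row)) := by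
  rw [pv_inter_len]
  rcases Bool.eq_false_or_eq_true (rows.any (fun row => pvCur row && PySem.Set.contains t (pvFam row))) with h | h
  · rw [h]
    rw [List.any_eq_true] at h
    rcases h with ⟨row, hrow, hrr⟩
    rw [Bool.and_eq_true, PySem.Set.contains_iff] at hrr
    simp only [decide_eq_true_eq]
    exact ⟨pvFam row, (pv_mem_foldl rows PySem.Set.empty (pvFam row)).2 (Or.inr ⟨row, hrow, hrr.1, rfl⟩), hrr.2⟩
  · rw [h]
    rw [List.any_eq_false] at h
    simp only [decide_eq_false_iff_not]
    rintro ⟨x, hx, hxt⟩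
    rcases (pv_mem_foldl rows PySem.Set.empty x).1 hx with h0 | ⟨row, hrow, hcur, hfam⟩
    · exact absurd h0 (List.not_mem_nil)
    · have := h row hrow
      rw [hcur, Bool.true_and, Bool.not_eq_true, Bool.eq_false_iff, Ne, PySem.Set.contains_iff] at this
      exact this (hfam ▸ hxt)

-- ===== VERDICT (by name: the statement is the Claim_ definition above) =====
theorem current_source_family_balance_spec : Claim_equal_current_source_family_balance := by
  intro rows _
  unfold Spec_current_source_family_balance current_source_family_balance current_source_family_balance_alt
  dsimp only
  rw [pv_altLoop]
  rw [show pvBaselineB = pvBaselineA from rfl, show pvProxyB = pvProxyA from rfl]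
  rw [pv_flag_eq rows pvBaselineA, pv_flag_eq rows pvProxyA]
  simp only [Bool.false_or]
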